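-- pv_equiv track=rewrite | github.com/th3d33pblu3/AOC | AOC2015/Day 13/solve.py | get_all_round_table_perms
-- ===== SOURCE A (Python) =====
-- from itertools import permutations
--
-- def get_all_round_table_perms(guests):
--     fix_point = guests[0]
--     others = guests[1:]
--     perms = permutations(others)
--     all_perms = []
--     for perm in perms:
--         perm = list(perm)
--         perm.insert(0, fix_point)
--         all_perms.append(perm)
--     return all_perms
-- ===== SOURCE B (Python) =====
-- def get_all_round_table_perms(guests):
--     fix_point = guests[0]
--     rows = [([fix_point], guests[1:])]
--     for _ in range(len(guests) - 1):
--         rows = [(p + [rem[k]], rem[:k] + rem[k + 1:])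
--                 for p, rem in rows for k in range(len(rem))]
--     return [p for p, _ in rows]
-- ===== Notes on version B (the rewrite author's own statement) =====
-- stated objective: alternative
-- what changed: Replaces itertools.permutations (recursive/lazy per-permutation generation consumed by a loop that inserts the fixed guest) with an iterative breadth-first expansion: a worklist of (partial seating, remaining guests) pairs is expanded level by level with a comprehension, which reproduces itertools' index-lexicographic emission order.
import Mathlib
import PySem

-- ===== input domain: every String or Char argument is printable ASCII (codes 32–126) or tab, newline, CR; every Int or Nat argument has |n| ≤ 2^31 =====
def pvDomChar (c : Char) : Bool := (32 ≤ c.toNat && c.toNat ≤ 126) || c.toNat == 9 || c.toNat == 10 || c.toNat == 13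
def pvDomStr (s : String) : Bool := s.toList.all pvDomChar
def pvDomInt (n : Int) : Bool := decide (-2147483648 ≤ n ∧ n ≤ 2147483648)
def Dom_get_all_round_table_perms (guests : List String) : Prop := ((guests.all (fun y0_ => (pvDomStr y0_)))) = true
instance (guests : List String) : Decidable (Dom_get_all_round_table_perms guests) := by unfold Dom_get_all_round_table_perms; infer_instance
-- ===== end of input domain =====

-- B replaces itertools-style recursive permutation generation by an iterative level-by-level
-- (breadth-first) expansion of partial seatings; alternative decomposition, same output order.


-- ===== PORT A =====
-- hand port of itertools.permutations (PySem has no primitive): at each position pick each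
-- still-remaining element by index, in left-to-right index order — exactly the documented
-- emission order, duplicates emitted as Python does; fuel = length of the list (exact there).
def pvPermsFuel : Nat → List String → List (List String)
  | 0, _ => [[]]
  | n + 1, l => (List.range l.length).flatMap
      (fun k => (pvPermsFuel n (l.take k ++ l.drop (k + 1))).map (fun p => l.getD k "" :: p))

def get_all_round_table_perms (guests : List String) : List (List String) :=
  match PySem.List.pyGet? guests 0 with
  | none => []   -- guests[0] raises IndexError in Python; excluded by Pre_
  | some fix_point =>
    let others := PySem.List.slice guests (some 1) none
    -- for perm in perms: perm = list(perm); perm.insert(0, fix_point); all_perms.append(perm)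
    (pvPermsFuel others.length others).foldl (fun all_perms perm => all_perms ++ [fix_point :: perm]) []

-- ===== PORT B =====
-- one expansion round: rows = [(p + [rem[k]], rem[:k] + rem[k+1:]) for p, rem in rows for k in range(len(rem))]
def pvStepB (rows : List (List String × List String)) : List (List String × List String) :=
  rows.flatMap (fun pr =>
    (List.range pr.2.length).map (fun k => (pr.1 ++ [pr.2.getD k ""], pr.2.take k ++ pr.2.drop (k + 1))))

def get_all_round_table_perms_alt (guests : List String) : List (List String) :=
  match PySem.List.pyGet? guests 0 with
  | none => []   -- guests[0] raises IndexError in Python; excluded by Pre_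
  | some fix_point =>
    let rows := (List.range (guests.length - 1)).foldl
      (fun rows _ => pvStepB rows) [([fix_point], PySem.List.slice guests (some 1) none)]
    rows.map Prod.fst

-- ===== PRECONDITION & SPEC =====
-- Pre_ excludes only the empty guest list, on which A's 'guests[0]' raises IndexError (B raises too).
def Pre_get_all_round_table_perms (guests : List String) : Prop := guests ≠ []
instance (guests : List String) : Decidable (Pre_get_all_round_table_perms guests) := by unfold Pre_get_all_round_table_perms; infer_instance
def pvWitness_get_all_round_table_perms : List String := ["Alice", "Bob", "Carol"]

def Spec_get_all_round_table_perms (guests : List String) (out : List (List String)) : Prop := out = get_all_round_table_perms_alt guests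
instance (guests : List String) (out : List (List String)) : Decidable (Spec_get_all_round_table_perms guests out) := by unfold Spec_get_all_round_table_perms; infer_instance

-- ===== CLAIM (what is proved, stated in full; the proofs are below) =====
def Claim_equal_get_all_round_table_perms : Prop := ∀ (guests : List String), Dom_get_all_round_table_perms guests → Pre_get_all_round_table_perms guests → Spec_get_all_round_table_perms guests (get_all_round_table_perms guests)

-- ===== LEMMAS AND PROOFS =====

def pvIter : Nat → List (List String × List String) → List (List String × List String)
  | 0, rows => rows
  | n + 1, rows => pvIter n (pvStepB rows)

theorem pvFoldl_eq_iter (l : List Nat) (rows : List (List String × List String)) :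
    l.foldl (fun r _ => pvStepB r) rows = pvIter l.length rows := by
  induction l generalizing rows with
  | nil => rfl
  | cons x xs ih => simp [List.foldl, pvIter, ih]

theorem pvStepB_append (xs ys : List (List String × List String)) :
    pvStepB (xs ++ ys) = pvStepB xs ++ pvStepB ys := by
  simp [pvStepB]

theorem pvIter_append (n : Nat) (xs ys : List (List String × List String)) :
    pvIter n (xs ++ ys) = pvIter n xs ++ pvIter n ys := by
  induction n generalizing xs ys with
  | zero => rfl
  | succ m ih => simp [pvIter, pvStepB_append, ih]

theorem pvIter_nil (n : Nat) : pvIter n [] = [] := by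
  induction n with
  | zero => rfl
  | succ m ih => simp [pvIter, pvStepB, ih]

theorem pvIter_flatMap_singleton (n : Nat) (xs : List (List String × List String)) :
    pvIter n xs = xs.flatMap (fun x => pvIter n [x]) := by
  induction xs with
  | nil => simp [pvIter_nil]
  | cons x rest ih =>
    have : x :: rest = [x] ++ rest := rfl
    rw [this, pvIter_append, ih]
    simp

theorem pvMain (n : Nat) : ∀ (rem : List String) (p : List String), rem.length = n →
    (pvIter n [(p, rem)]).map Prod.fst = (pvPermsFuel n rem).map (fun q => p ++ q) := by
  induction n with
  | zero =>
    intro rem p h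
    simp [pvIter, pvPermsFuel]
  | succ m ih =>
    intro rem p h
    have hstep : pvStepB [(p, rem)] =
        (List.range rem.length).map
          (fun k => (p ++ [rem.getD k ""], rem.take k ++ rem.drop (k + 1))) := by
      simp [pvStepB]
    rw [show pvIter (m + 1) [(p, rem)] = pvIter m (pvStepB [(p, rem)]) from rfl, hstep,
      pvIter_flatMap_singleton, List.flatMap_map, List.map_flatMap]
    simp only [pvPermsFuel, List.map_flatMap, List.map_map]
    apply List.flatMap_congr
    intro k hk
    have hk' : k < rem.length := List.mem_range.mp hk
    have hlen : (rem.take k ++ rem.drop (k + 1)).length = m := by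
      simp [List.length_take, List.length_drop]
      omega
    rw [ih _ _ hlen]
    apply List.map_congr_left
    intro q _
    simp

theorem get_all_round_table_perms_spec : Claim_equal_get_all_round_table_perms := by
  intro guests _ hpre
  unfold Spec_get_all_round_table_perms
  match guests with
  | [] => exact absurd rfl hpre
  | g :: rest =>
    unfold get_all_round_table_perms get_all_round_table_perms_alt
    have hget : PySem.List.pyGet? (g :: rest) 0 = some g := PySem.List.pyGet?_zero_cons g rest
    rw [hget]
    have hsl : PySem.List.slice (g :: rest) (some 1) none = rest := by
      have h1 : ((1 : Nat) : Int) = (1 : Int) := by norm_num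
      rw [← h1, PySem.List.slice_from_natCast]
      simp
    simp only [hsl]
    rw [PySem.List.foldl_append_singleton_eq_map]
    have hlen : (g :: rest).length - 1 = rest.length := by simp
    rw [hlen, pvFoldl_eq_iter, List.length_range, pvMain rest.length rest [g] rfl]
    apply List.map_congr_left
    intro q _
    simp
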